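-- pv_equiv track=rewrite | github.com/olofmogren/pymdslides | backend_odp_initial_experiments.py | md_extract_formulas
-- ===== SOURCE A (Python) =====
-- def md_extract_formulas(md):
--   md_sane_lines = []
--   formulas = []
--   number = 0
--   for line in md.split('\n'):
--     if '$' in line:
--       formula_starts_ends = []
--       formula_start = None
--       for p in range(len(line)):
--         if line[p] == '$' and (p == 0 or line[p-1] != '\\'):
--           if formula_start is None:
--             formula_start = p
--           else:
--             formula_starts_ends.append((formula_start,p+1))
--             formula_start = None
--       new_line = ''
--       pos = 0
--       for (s,e) in formula_starts_ends:
--         new_line += line[pos:s]+'${}$'.format(number)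
--         formulas.append((number, line[s:e]))
--         number += 1
--         pos = e
--       if pos < len(line):
--         new_line += line[pos:]
--       md_sane_lines.append(new_line)
--     else:
--       md_sane_lines.append(line)
--   return '\n'.join(md_sane_lines), formulas
-- ===== SOURCE B (Python) =====
-- def md_extract_formulas(md):
--   # Single left-to-right pass over the whole string: a small state machine
--   # (inside-formula flag + pending buffer) replaces A's split/two-phase per-line scan.
--   inside = False
--   buf = []
--   prev = '\n'
--   number = 0
--   out = []
--   formulas = []
--   for c in md:
--     if c == '\n':
--       out += buf
--       out.append(c)
--       inside, buf = False, []
--     elif c == '$' and prev != '\\':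
--       if inside:
--         out.append('${}$'.format(number))
--         formulas.append((number, ''.join(buf) + '$'))
--         number += 1
--         inside, buf = False, []
--       else:
--         inside, buf = True, ['$']
--     elif inside:
--       buf.append(c)
--     else:
--       out.append(c)
--     prev = c
--   out += buf
--   return ''.join(out), formulas
-- ===== Notes on version B (the rewrite author's own statement) =====
-- stated objective: alternative
-- what changed: A splits the text into lines and processes each line in two phases (index-scan collecting (start,end) pairs of unescaped $-delimited spans, then a rebuild pass over those pairs); B is a single left-to-right character pass over the whole string with an inside-formula flag and a pending buffer, flushing at newlines, with no split/join and no intermediate pair list.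
import Mathlib
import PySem

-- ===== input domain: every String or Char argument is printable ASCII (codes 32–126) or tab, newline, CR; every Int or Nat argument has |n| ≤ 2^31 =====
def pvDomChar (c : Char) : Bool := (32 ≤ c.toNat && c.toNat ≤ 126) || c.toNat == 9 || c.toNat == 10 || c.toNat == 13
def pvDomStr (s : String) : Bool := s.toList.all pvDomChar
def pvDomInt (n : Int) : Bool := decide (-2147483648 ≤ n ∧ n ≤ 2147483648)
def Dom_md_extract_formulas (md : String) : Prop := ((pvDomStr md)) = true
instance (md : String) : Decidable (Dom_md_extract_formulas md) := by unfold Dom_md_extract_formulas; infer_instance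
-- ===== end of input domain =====

-- B replaces A's per-line two-phase scan by a single state-machine pass over the whole string (objective: alternative).

-- ===== PORT A =====
-- inner scan loop body: 'if line[p] == '$' and (p == 0 or line[p-1] != '\\'): …'
def aScanStep (line : List Char) (st : List (Int × Int) × Option Int) (p : Int) :
    List (Int × Int) × Option Int :=
  if PySem.List.pyGet? line p = some '$' ∧ (p = 0 ∨ PySem.List.pyGet? line (p - 1) ≠ some '\\') then
    match st.2 with
    | none => (st.1, some p)
    | some s => (st.1 ++ [(s, p + 1)], none)
  else st

-- rebuild loop body: state (new_line, pos, number, formulas)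
def aRebStep (line : List Char) (st : List Char × Int × Int × List (Int × String)) (se : Int × Int) :
    List Char × Int × Int × List (Int × String) :=
  (st.1 ++ PySem.List.slice line (some st.2.1) (some se.1) ++ '$' :: PySem.Int.toChars st.2.2.1 ++ ['$'],
   se.2, st.2.2.1 + 1,
   st.2.2.2 ++ [(st.2.2.1, String.ofList (PySem.List.slice line (some se.1) (some se.2)))])

-- per-line body of A's outer loop: state (md_sane_lines, formulas, number)
def aLineStep (st : List (List Char) × List (Int × String) × Int) (line : List Char) :
    List (List Char) × List (Int × String) × Int :=
  if PySem.Chars.isIn ['$'] line then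
    let scan := (PySem.List.pyRange 0 (line.length : Int) 1).foldl (aScanStep line) ([], none)
    let reb := scan.1.foldl (aRebStep line) ([], 0, st.2.2, st.2.1)
    let nl := if reb.2.1 < (line.length : Int) then reb.1 ++ PySem.List.slice line (some reb.2.1) none else reb.1
    (st.1 ++ [nl], reb.2.2.2, reb.2.2.1)
  else (st.1 ++ [line], st.2.1, st.2.2)

def md_extract_formulas (md : String) : String × (List (Int × String)) :=
  let res := (PySem.Chars.splitOn md.toList ['\n']).foldl aLineStep ([], [], 0)
  (String.ofList (PySem.Chars.join ['\n'] res.1), res.2.1)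

-- ===== PORT B =====
-- one step of B's single pass: state (inside, buf, prev, number, out, formulas)
def bStep (st : Bool × List Char × Char × Int × List Char × List (Int × String)) (c : Char) :
    Bool × List Char × Char × Int × List Char × List (Int × String) :=
  if c = '\n' then (false, [], c, st.2.2.2.1, st.2.2.2.2.1 ++ st.2.1 ++ [c], st.2.2.2.2.2)
  else if c = '$' ∧ st.2.2.1 ≠ '\\' then
    if st.1 then
      (false, [], c, st.2.2.2.1 + 1,
       st.2.2.2.2.1 ++ '$' :: PySem.Int.toChars st.2.2.2.1 ++ ['$'],
       st.2.2.2.2.2 ++ [(st.2.2.2.1, String.ofList (st.2.1 ++ ['$']))])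
    else (true, ['$'], c, st.2.2.2.1, st.2.2.2.2.1, st.2.2.2.2.2)
  else if st.1 then (true, st.2.1 ++ [c], c, st.2.2.2.1, st.2.2.2.2.1, st.2.2.2.2.2)
  else (false, [], c, st.2.2.2.1, st.2.2.2.2.1 ++ [c], st.2.2.2.2.2)

def md_extract_formulas_alt (md : String) : String × (List (Int × String)) :=
  let st := md.toList.foldl bStep (false, [], '\n', 0, [], [])
  (String.ofList (st.2.2.2.2.1 ++ st.2.1), st.2.2.2.2.2)

-- ===== PRECONDITION & SPEC =====
def Spec_md_extract_formulas (md : String) (out : String × (List (Int × String))) : Prop := out = md_extract_formulas_alt md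
instance (md : String) (out : String × (List (Int × String))) : Decidable (Spec_md_extract_formulas md out) := by unfold Spec_md_extract_formulas; infer_instance

-- ===== CLAIM (what is proved, stated in full; the proofs are below) =====
def Claim_equal_md_extract_formulas : Prop := ∀ (md : String), Dom_md_extract_formulas md → Spec_md_extract_formulas md (md_extract_formulas md)

-- ===== LEMMAS AND PROOFS =====

-- proof-side splitter: pvSplit pre cs = the lines of pre ++ cs, splitting cs at '\n'
def pvSplit (pre : List Char) : List Char → List (List Char)
  | [] => [pre]
  | c :: rest => if c = '\n' then pre :: pvSplit [] rest else pvSplit (pre ++ [c]) rest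

lemma pvSplit_ne_nil (pre cs : List Char) : pvSplit pre cs ≠ [] := by
  induction cs generalizing pre with
  | nil => simp [pvSplit]
  | cons c rest ih => by_cases h : c = '\n' <;> simp [pvSplit, h, ih]

lemma splitOn_go_eq (l : List Char) : ∀ (fuel : Nat) (cur : List Char) (acc : List (List Char)),
    l.length < fuel →
    PySem.Chars.splitOn.go ['\n'] fuel l cur acc = acc.reverse ++ pvSplit cur.reverse l := by
  induction l with
  | nil =>
    intro fuel cur acc h
    cases fuel with
    | zero => omega
    | succ f => simp [PySem.Chars.splitOn.go, pvSplit]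
  | cons c rest ih =>
    intro fuel cur acc h
    cases fuel with
    | zero => omega
    | succ f =>
      by_cases hc : c = '\n'
      · subst hc
        rw [PySem.Chars.splitOn.go]
        simp only [List.isPrefixOf, beq_self_eq_true, Bool.true_and, if_pos]
        rw [show List.drop ['\n'].length ('\n' :: rest) = rest from rfl]
        rw [ih f [] (cur.reverse :: acc) (by simpa using Nat.lt_of_succ_lt_succ h)]
        simp [pvSplit]
      · rw [PySem.Chars.splitOn.go]
        have hp : List.isPrefixOf ['\n'] (c :: rest) = false := by
          simp [List.isPrefixOf]
          exact fun hh => (hc hh.symm).elim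
        rw [hp]
        simp only [Bool.false_eq_true, if_false]
        rw [ih f (c :: cur) acc (by simpa using Nat.lt_of_succ_lt_succ h)]
        simp [pvSplit, hc]

lemma splitOn_eq_pvSplit (cs : List Char) : PySem.Chars.splitOn cs ['\n'] = pvSplit [] cs := by
  unfold PySem.Chars.splitOn
  rw [splitOn_go_eq cs (cs.length + 1) [] [] (by omega)]
  simp

lemma join_pvSplit (cs : List Char) : ∀ pre, PySem.Chars.join ['\n'] (pvSplit pre cs) = pre ++ cs := by
  induction cs with
  | nil => intro pre; simp [pvSplit, PySem.Chars.join_singleton]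
  | cons c rest ih =>
    intro pre
    by_cases hc : c = '\n'
    · subst hc
      obtain ⟨l, ls, hls⟩ : ∃ l ls, pvSplit ([] : List Char) rest = l :: ls := by
        cases hE : pvSplit ([] : List Char) rest with
        | nil => exact absurd hE (pvSplit_ne_nil _ _)
        | cons l ls => exact ⟨l, ls, rfl⟩
      have h1 : pvSplit pre ('\n' :: rest) = pre :: l :: ls := by simp [pvSplit, hls]
      rw [h1, PySem.Chars.join_cons_cons]
      have := ih ([] : List Char)
      rw [hls] at this
      simp [this]
    · simp only [pvSplit, if_neg hc]
      rw [ih (pre ++ [c])]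
      simp

lemma pvSplit_no_newline (cs : List Char) : ∀ pre, '\n' ∉ pre → ∀ l ∈ pvSplit pre cs, '\n' ∉ l := by
  induction cs with
  | nil => intro pre hpre l hl; simp [pvSplit] at hl; subst hl; exact hpre
  | cons c rest ih =>
    intro pre hpre l hl
    by_cases hc : c = '\n'
    · subst hc
      have h1 : pvSplit pre ('\n' :: rest) = pre :: pvSplit [] rest := by simp [pvSplit]
      rw [h1] at hl
      rcases List.mem_cons.mp hl with rfl | hl
      · exact hpre
      · exact ih [] (by simp) l hl
    · have h1 : pvSplit pre (c :: rest) = pvSplit (pre ++ [c]) rest := by simp [pvSplit, hc]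
      rw [h1] at hl
      exact ih (pre ++ [c]) (by simp [hpre, Ne.symm hc]) l hl

-- proof-side per-line result of A (the value aLineStep appends / threads)
def aLine (line : List Char) (number : Int) (formulas : List (Int × String)) :
    List Char × Int × List (Int × String) :=
  if PySem.Chars.isIn ['$'] line then
    let scan := (PySem.List.pyRange 0 (line.length : Int) 1).foldl (aScanStep line) ([], none)
    let reb := scan.1.foldl (aRebStep line) ([], 0, number, formulas)
    let nl := if reb.2.1 < (line.length : Int) then reb.1 ++ PySem.List.slice line (some reb.2.1) none else reb.1
    (nl, reb.2.2.1, reb.2.2.2)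
  else (line, number, formulas)

def aLines : List (List Char) → Int → List (Int × String) → List (List Char) × Int × List (Int × String)
  | [], num, fms => ([], num, fms)
  | l :: rest, num, fms =>
    let r := aLine l num fms
    let rs := aLines rest r.2.1 r.2.2
    (r.1 :: rs.1, rs.2)

lemma foldl_aLineStep (L : List (List Char)) : ∀ msl num fms,
    L.foldl aLineStep (msl, fms, num) =
      (msl ++ (aLines L num fms).1, (aLines L num fms).2.2, (aLines L num fms).2.1) := by
  induction L with
  | nil => intro msl num fms; simp [aLines]
  | cons l rest ih =>
    intro msl num fms
    have hstep : aLineStep (msl, fms, num) l =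
        (msl ++ [(aLine l num fms).1], (aLine l num fms).2.2, (aLine l num fms).2.1) := by
      by_cases h : PySem.Chars.isIn ['$'] l <;> simp [aLineStep, aLine, h]
    simp only [List.foldl_cons, hstep, ih, aLines]
    simp


-- slice split: xs[a:] = xs[a:b] + xs[b:]
lemma sliceSplit {α : Type} (xs : List α) (a b : Nat) (h : a ≤ b) :
    PySem.List.slice xs (some (a:Int)) none =
      PySem.List.slice xs (some (a:Int)) (some (b:Int)) ++ PySem.List.slice xs (some (b:Int)) none := by
  rw [PySem.List.slice_from_natCast, PySem.List.slice_natCast, PySem.List.slice_from_natCast]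
  conv_lhs => rw [← List.take_append_drop (b - a) (xs.drop a)]
  rw [List.drop_drop]
  have hba : a + (b - a) = b := by omega
  rw [hba]

-- slice extension by the next character
lemma sliceExt {α : Type} (pre t : List α) (c : α) (a : Nat) (h : a ≤ pre.length) :
    PySem.List.slice (pre ++ c :: t) (some (a:Int)) (some ((pre.length + 1 : Nat):Int)) =
      PySem.List.slice (pre ++ c :: t) (some (a:Int)) (some ((pre.length : Nat):Int)) ++ [c] := by
  rw [PySem.List.slice_natCast, PySem.List.slice_natCast]
  rw [List.drop_append_of_le_length h]
  rw [List.take_append, List.take_append]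
  have h1 : (pre.drop a).length = pre.length - a := by simp
  rw [List.take_of_length_le (le_of_eq h1 |>.trans (by omega)),
      List.take_of_length_le (le_of_eq h1 |>.trans (by omega))]
  have h2 : pre.length + 1 - a - (pre.drop a).length = 1 := by omega
  have h3 : pre.length - a - (pre.drop a).length = 0 := by omega
  rw [h2, h3]
  simp

lemma sliceNil {α : Type} (xs : List α) (a : Nat) :
    PySem.List.slice xs (some (a:Int)) (some (a:Int)) = [] := by
  rw [PySem.List.slice_natCast]; simp

lemma sliceFull {α : Type} (xs : List α) (a : Nat) :
    PySem.List.slice xs (some (a:Int)) (some ((xs.length : Nat):Int)) =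
      PySem.List.slice xs (some (a:Int)) none := by
  rw [PySem.List.slice_natCast, PySem.List.slice_from_natCast]
  exact List.take_of_length_le (by simp)

-- the A-side unescaped-$ test at position pre.length equals B's prev-based test
lemma condEquiv (pre t : List Char) (c : Char) :
    ((PySem.List.pyGet? (pre ++ c :: t) (pre.length : Int) = some '$' ∧
      ((pre.length : Int) = 0 ∨ PySem.List.pyGet? (pre ++ c :: t) ((pre.length : Int) - 1) ≠ some '\\'))
      ↔ (c = '$' ∧ pre.getLastD '\n' ≠ '\\')) := by
  rw [PySem.List.pyGet?_append_length]
  rcases pre.eq_nil_or_concat with rfl | ⟨pre0, d, rfl⟩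
  · simp
  · simp only [List.concat_eq_append]
    have hne : ((pre0 ++ [d]).length : Int) ≠ 0 := by simp; omega
    have hidx : ((pre0 ++ [d]).length : Int) - 1 = (pre0.length : Int) := by simp
    have hget : PySem.List.pyGet? ((pre0 ++ [d]) ++ c :: t) (pre0.length : Int) = some d := by
      rw [List.append_assoc, List.singleton_append]
      exact PySem.List.pyGet?_append_length pre0 _ d
    rw [hidx, hget, List.getLastD_concat]
    simp
    intro _ h0
    omega

-- the central per-line invariant: B's pass over the rest of a line tracks A's scan+rebuild
lemma main_inv (t : List Char) : ∀ (pre : List Char) (P : List (Int × Int)) (s? : Option Nat)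
    (num0 num : Int) (fms0 fms : List (Int × String)) (nl out : List Char) (pos : Nat),
    '\n' ∉ t →
    P.foldl (aRebStep (pre ++ t)) ([], 0, num0, fms0) = (nl, (pos : Int), num, fms) →
    (match s? with
     | none => pos ≤ pre.length
     | some s => pos ≤ s ∧ s < pre.length) →
    (let line := pre ++ t
     let res := (PySem.List.pyRange (pre.length : Int) (line.length : Int) 1).foldl (aScanStep line) (P, s?.map (Nat.cast))
     let reb := res.1.foldl (aRebStep line) ([], 0, num0, fms0)
     let nlA := if reb.2.1 < (line.length : Int) then reb.1 ++ PySem.List.slice line (some reb.2.1) none else reb.1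
     let st := t.foldl bStep (s?.isSome,
       (match s? with
        | some s => PySem.List.slice line (some (s : Int)) (some (pre.length : Int))
        | none => []),
       pre.getLastD '\n', num,
       out ++ nl ++ PySem.List.slice line (some (pos : Int))
         (some (match s? with | some s => (s : Int) | none => (pre.length : Int))), fms)
     st.2.2.2.2.1 ++ st.2.1 = out ++ nlA ∧ st.2.2.2.1 = reb.2.2.1 ∧ st.2.2.2.2.2 = reb.2.2.2) := by
  induction t with
  | nil =>
    intro pre P s? num0 num fms0 fms nl out pos _ hreb hs
    simp only [List.append_nil] at hreb ⊢
    have hr : PySem.List.pyRange (pre.length : Int) (pre.length : Int) 1 = [] := by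
      simp [PySem.List.pyRange]
    cases s? with
    | none =>
      simp only [hr, List.foldl_nil, hreb, Option.isSome_none, Option.map_none]
      refine ⟨?_, trivial, trivial⟩
      by_cases hp : pos < pre.length
      · rw [if_pos (by exact_mod_cast hp), sliceFull pre pos]
        simp
      · have hpe : pos = pre.length := by omega
        subst hpe
        rw [if_neg (by simp), sliceNil]
        simp
    | some s =>
      simp only [hr, List.foldl_nil, hreb, Option.isSome_some, Option.map_some]
      refine ⟨?_, trivial, trivial⟩
      rw [if_pos (by exact_mod_cast lt_of_le_of_lt hs.1 hs.2)]
      rw [sliceSplit pre pos s hs.1, ← sliceFull pre s]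
      simp
  | cons c t' ih =>
    intro pre P s? num0 num fms0 fms nl out pos hn hreb hs
    have hcn : c ≠ '\n' := fun h => hn (h ▸ List.mem_cons_self ..)
    have hn' : '\n' ∉ t' := fun h => hn (List.mem_cons_of_mem _ h)
    have hassoc : (pre ++ [c]) ++ t' = pre ++ c :: t' := by simp
    have hlt : (pre.length : Int) < (((pre ++ c :: t').length : Nat) : Int) := by simp
    have hrange := PySem.List.pyRange_one_cons hlt
    have hclen : (((pre ++ [c]).length : Nat) : Int) = (pre.length : Int) + 1 := by simp
    by_cases hC : c = '$' ∧ pre.getLastD '\n' ≠ '\\'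
    · obtain ⟨hceq, hprev⟩ := hC
      subst hceq
      cases s? with
      | none =>
        simp only [hrange, List.foldl_cons]
        have hpush : ((pre.length + 1 : Nat) : Int) = (pre.length : Int) + 1 := by push_cast; ring
        have ha : aScanStep (pre ++ '$' :: t') (P, Option.map Nat.cast (none : Option Nat)) (pre.length : Int)
            = (P, some (pre.length : Int)) := by
          simp only [aScanStep, Option.map_none]
          rw [if_pos ((condEquiv pre t' '$').mpr ⟨rfl, hprev⟩)]
        have hb : bStep ((none : Option Nat).isSome, [], pre.getLastD '\n', num,
            out ++ nl ++ PySem.List.slice (pre ++ '$' :: t') (some (pos : Int)) (some (pre.length : Int)), fms) '$'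
            = (true, ['$'], '$', num,
               out ++ nl ++ PySem.List.slice (pre ++ '$' :: t') (some (pos : Int)) (some (pre.length : Int)), fms) := by
          simp [bStep]
          simpa [List.getLastD_eq_getLast?] using hprev
        rw [ha, hb]
        have hbuf : PySem.List.slice (pre ++ '$' :: t') (some ((pre.length : Nat) : Int)) (some ((pre.length : Int) + 1)) = ['$'] := by
          rw [← hpush, sliceExt pre t' '$' pre.length le_rfl, sliceNil]; simp
        have ihres := ih (pre ++ ['$']) P (some pre.length) num0 num fms0 fms nl out pos hn'
          (by rw [hassoc]; exact hreb) ⟨hs, by simp⟩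
        simp only [hassoc, hclen, List.getLastD_concat, Option.isSome_some, Option.map_some, hbuf] at ihres
        exact ihres
      | some s =>
        simp only [hrange, List.foldl_cons]
        have hs' : pos ≤ s ∧ s < pre.length := hs
        have hpush : ((pre.length + 1 : Nat) : Int) = (pre.length : Int) + 1 := by push_cast; ring
        have ha : aScanStep (pre ++ '$' :: t') (P, Option.map Nat.cast (some s)) (pre.length : Int)
            = (P ++ [((s : Int), (pre.length : Int) + 1)], none) := by
          simp only [aScanStep, Option.map_some]
          rw [if_pos ((condEquiv pre t' '$').mpr ⟨rfl, hprev⟩)]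
        have hb : bStep ((some s).isSome,
            PySem.List.slice (pre ++ '$' :: t') (some (s : Int)) (some (pre.length : Int)),
            pre.getLastD '\n', num,
            out ++ nl ++ PySem.List.slice (pre ++ '$' :: t') (some (pos : Int)) (some (s : Int)), fms) '$'
            = (false, [], '$', num + 1,
               (out ++ nl ++ PySem.List.slice (pre ++ '$' :: t') (some (pos : Int)) (some (s : Int)))
                 ++ '$' :: PySem.Int.toChars num ++ ['$'],
               fms ++ [(num, String.ofList
                 (PySem.List.slice (pre ++ '$' :: t') (some (s : Int)) (some (pre.length : Int)) ++ ['$']))]) := by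
          simp [bStep]
          simpa [List.getLastD_eq_getLast?] using hprev
        rw [ha, hb]
        have hfm : PySem.List.slice (pre ++ '$' :: t') (some (s : Int)) (some ((pre.length + 1 : Nat) : Int))
            = PySem.List.slice (pre ++ '$' :: t') (some (s : Int)) (some ((pre.length : Nat) : Int)) ++ ['$'] :=
          sliceExt pre t' '$' s hs'.2.le
        have hrebnew : (P ++ [((s : Int), (pre.length : Int) + 1)]).foldl (aRebStep (pre ++ '$' :: t')) ([], 0, num0, fms0)
            = (nl ++ PySem.List.slice (pre ++ '$' :: t') (some (pos : Int)) (some (s : Int))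
                 ++ '$' :: PySem.Int.toChars num ++ ['$'],
               ((pre.length + 1 : Nat) : Int), num + 1,
               fms ++ [(num, String.ofList
                 (PySem.List.slice (pre ++ '$' :: t') (some (s : Int)) (some ((pre.length : Nat) : Int)) ++ ['$']))]) := by
          rw [List.foldl_append, hreb]
          simp only [List.foldl_cons, List.foldl_nil, aRebStep, hpush, ← hfm]
        have hnil2 : PySem.List.slice (pre ++ '$' :: t') (some ((pre.length : Int) + 1)) (some ((pre.length : Int) + 1)) = [] := by
          rw [← hpush]; exact sliceNil _ _
        have ihres := ih (pre ++ ['$']) (P ++ [((s : Int), (pre.length : Int) + 1)]) none num0 (num + 1) fms0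
          (fms ++ [(num, String.ofList
            (PySem.List.slice (pre ++ '$' :: t') (some (s : Int)) (some ((pre.length : Nat) : Int)) ++ ['$']))])
          (nl ++ PySem.List.slice (pre ++ '$' :: t') (some (pos : Int)) (some (s : Int))
             ++ '$' :: PySem.Int.toChars num ++ ['$'])
          out (pre.length + 1) hn'
          (by rw [hassoc]; exact hrebnew) (by simp)
        simp only [hassoc, hclen, hpush, List.getLastD_concat, Option.isSome_none, Option.map_none, hnil2] at ihres
        simp only [List.append_assoc, List.append_nil] at ihres ⊢
        exact ihres
    · have hC' : ¬(c = '$' ∧ pre.getLast?.getD '\n' ≠ '\\') := by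
        simpa [List.getLastD_eq_getLast?] using hC
      have hpush : ((pre.length + 1 : Nat) : Int) = (pre.length : Int) + 1 := by push_cast; ring
      have ha : aScanStep (pre ++ c :: t') (P, Option.map Nat.cast s?) (pre.length : Int)
          = (P, Option.map Nat.cast s?) := by
        simp only [aScanStep]
        rw [if_neg (fun hcc => hC ((condEquiv pre t' c).mp hcc))]
      cases s? with
      | none =>
        simp only [hrange, List.foldl_cons]
        rw [ha]
        have hb : bStep ((none : Option Nat).isSome, [], pre.getLastD '\n', num,
            out ++ nl ++ PySem.List.slice (pre ++ c :: t') (some (pos : Int)) (some (pre.length : Int)), fms) c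
            = (false, [], c, num,
               (out ++ nl ++ PySem.List.slice (pre ++ c :: t') (some (pos : Int)) (some (pre.length : Int))) ++ [c],
               fms) := by
          simp [bStep, hcn, List.getLastD_eq_getLast?, hC']
        rw [hb]
        have hext' : PySem.List.slice (pre ++ c :: t') (some (pos : Int)) (some ((pre.length : Int) + 1))
            = PySem.List.slice (pre ++ c :: t') (some (pos : Int)) (some ((pre.length : Nat) : Int)) ++ [c] := by
          rw [← hpush]; exact sliceExt pre t' c pos hs
        have ihres := ih (pre ++ [c]) P none num0 num fms0 fms nl out pos hn'
          (by rw [hassoc]; exact hreb) (by simp; omega)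
        simp only [hassoc, hclen, List.getLastD_concat, Option.isSome_none, Option.map_none, hext'] at ihres
        simp only [List.append_assoc] at ihres ⊢
        exact ihres
      | some s =>
        simp only [hrange, List.foldl_cons]
        rw [ha]
        have hs' : pos ≤ s ∧ s < pre.length := hs
        have hb : bStep ((some s).isSome,
            PySem.List.slice (pre ++ c :: t') (some (s : Int)) (some (pre.length : Int)),
            pre.getLastD '\n', num,
            out ++ nl ++ PySem.List.slice (pre ++ c :: t') (some (pos : Int)) (some (s : Int)), fms) c
            = (true,
               PySem.List.slice (pre ++ c :: t') (some (s : Int)) (some (pre.length : Int)) ++ [c], c, num,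
               out ++ nl ++ PySem.List.slice (pre ++ c :: t') (some (pos : Int)) (some (s : Int)), fms) := by
          simp [bStep, hcn, List.getLastD_eq_getLast?, hC']
        rw [hb]
        have hext' : PySem.List.slice (pre ++ c :: t') (some (s : Int)) (some ((pre.length : Int) + 1))
            = PySem.List.slice (pre ++ c :: t') (some (s : Int)) (some ((pre.length : Nat) : Int)) ++ [c] := by
          rw [← hpush]; exact sliceExt pre t' c s hs'.2.le
        have ihres := ih (pre ++ [c]) P (some s) num0 num fms0 fms nl out pos hn'
          (by rw [hassoc]; exact hreb) (by exact ⟨hs'.1, by simp; omega⟩)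
        simp only [hassoc, hclen, List.getLastD_concat, Option.isSome_some, Option.map_some, hext'] at ihres
        simp only [List.append_assoc] at ihres ⊢
        exact ihres

-- B's pass over a '$'-free, '\n'-free line copies it verbatim
lemma noDollar (l : List Char) : ∀ prev num out fms, '$' ∉ l → '\n' ∉ l →
    l.foldl bStep (false, [], prev, num, out, fms) =
      (false, [], l.getLastD prev, num, out ++ l, fms) := by
  induction l with
  | nil => intro prev num out fms _ _; simp
  | cons c rest ih =>
    intro prev num out fms hd hn
    have hc1 : c ≠ '\n' := fun h => hn (h ▸ List.mem_cons_self ..)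
    have hc2 : c ≠ '$' := fun h => hd (h ▸ List.mem_cons_self ..)
    have hstep : bStep (false, [], prev, num, out, fms) c = (false, [], c, num, out ++ [c], fms) := by
      simp [bStep, hc1, hc2]
    simp only [List.foldl_cons, hstep]
    rw [ih c num (out ++ [c]) fms (fun h => hd (List.mem_cons_of_mem _ h))
      (fun h => hn (List.mem_cons_of_mem _ h))]
    rcases rest with _ | ⟨d, t⟩
    · simp
    · rcases hlast : (d :: t).getLast? with _ | x
      · simp at hlast
      · simp [List.getLast?_cons_cons, hlast]

-- per line: B's pass from a fresh line-start state computes aLine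
lemma perLine (line : List Char) (num : Int) (fms : List (Int × String)) (out : List Char)
    (h : '\n' ∉ line) :
    (let st := line.foldl bStep (false, [], '\n', num, out, fms)
     st.2.2.2.2.1 ++ st.2.1 = out ++ (aLine line num fms).1 ∧
     st.2.2.2.1 = (aLine line num fms).2.1 ∧ st.2.2.2.2.2 = (aLine line num fms).2.2) := by
  by_cases hdol : PySem.Chars.isIn ['$'] line
  · have hreb0 : ([] : List (Int × Int)).foldl (aRebStep ([] ++ line)) ([], 0, num, fms)
        = ([], ((0 : Nat) : Int), num, fms) := by simp
    have hinv := main_inv line [] [] none num num fms fms [] out 0 h hreb0 (le_refl 0)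
    have h00 : PySem.List.slice line (some (0 : Int)) (some (0 : Int)) = [] := by
      simpa using sliceNil line 0
    simp only [List.nil_append, List.length_nil, Nat.cast_zero, Option.isSome_none, Option.map_none,
      List.getLastD_nil, h00, List.append_nil] at hinv
    simp only [aLine, if_pos hdol]
    exact hinv
  · have hnd : '$' ∉ line := by
      intro hmem
      obtain ⟨s, t, rfl⟩ := List.append_of_mem hmem
      exact hdol (by
        rw [PySem.Chars.isIn_iff_infix]
        exact ⟨s, t, by simp⟩)
    have := noDollar line '\n' num out fms hnd h
    simp only [aLine, if_neg hdol, this]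
    simp

-- over the joined lines
lemma topJoin (L : List (List Char)) : ∀ num fms out, (∀ l ∈ L, '\n' ∉ l) →
    (let r := aLines L num fms
     let st := (PySem.Chars.join ['\n'] L).foldl bStep (false, [], '\n', num, out, fms)
     st.2.2.2.2.1 ++ st.2.1 = out ++ PySem.Chars.join ['\n'] r.1 ∧
     st.2.2.2.1 = r.2.1 ∧ st.2.2.2.2.2 = r.2.2) := by
  induction L with
  | nil => intro num fms out _; simp [aLines, PySem.Chars.join_nil]
  | cons l rest ih =>
    intro num fms out hL
    cases rest with
    | nil =>
      have := perLine l num fms out (hL l (by simp))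
      simpa [aLines, PySem.Chars.join_singleton] using this
    | cons l2 rest2 =>
      have hjoin : PySem.Chars.join ['\n'] (l :: l2 :: rest2) =
          l ++ '\n' :: PySem.Chars.join ['\n'] (l2 :: rest2) := by
        rw [PySem.Chars.join_cons_cons]; simp
      rw [hjoin]
      obtain ⟨h1, h2, h3⟩ := perLine l num fms out (hL l (by simp))
      rw [List.foldl_append]
      set st1 := l.foldl bStep (false, [], '\n', num, out, fms) with hst1
      have hnl : bStep st1 '\n' =
          (false, [], '\n', st1.2.2.2.1, st1.2.2.2.2.1 ++ st1.2.1 ++ ['\n'], st1.2.2.2.2.2) := by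
        simp [bStep]
      simp only [List.foldl_cons, hnl, h2, h3]
      obtain ⟨g1, g2, g3⟩ := ih (aLine l num fms).2.1 (aLine l num fms).2.2
        (st1.2.2.2.2.1 ++ st1.2.1 ++ ['\n']) (fun x hx => hL x (by simp [hx]))
      refine ⟨?_, ?_, ?_⟩
      · rw [g1, h1]
        obtain ⟨m, ms, hms⟩ : ∃ m ms, (aLines (l2 :: rest2) (aLine l num fms).2.1 (aLine l num fms).2.2).1 = m :: ms := by
          cases hE : (aLines (l2 :: rest2) (aLine l num fms).2.1 (aLine l num fms).2.2).1 with
          | nil => simp [aLines] at hE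
          | cons m ms => exact ⟨m, ms, rfl⟩
        simp only [aLines, PySem.Chars.join_cons_cons]
        simp [aLines] at hms
        simp [hms]
      · simpa [aLines] using g2
      · simpa [aLines] using g3

-- ===== VERDICT (by name: the statement is the Claim_ definition above) =====
theorem md_extract_formulas_spec : Claim_equal_md_extract_formulas := by
  intro md _
  unfold Spec_md_extract_formulas md_extract_formulas md_extract_formulas_alt
  have hsplit := splitOn_eq_pvSplit md.toList
  have hjoin := join_pvSplit md.toList ([] : List Char)
  have hnl := pvSplit_no_newline md.toList ([] : List Char) (by simp)
  rw [hsplit, foldl_aLineStep]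
  obtain ⟨g1, g2, g3⟩ := topJoin (pvSplit [] md.toList) 0 [] [] hnl
  have hjoin' : PySem.Chars.join ['\n'] (pvSplit [] md.toList) = md.toList := by rw [hjoin]; simp
  rw [hjoin'] at g1 g2 g3
  simp only [List.nil_append] at g1 ⊢
  rw [Prod.ext_iff]
  exact ⟨by rw [← g1], by rw [g3]⟩
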